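-- pv_equiv track=rewrite | github.com/xiejia1995/MakingFullText | data/Nongjianv_Baishitong/getfulltext.py | CompXY
-- ===== SOURCE A (Python) =====
-- def CompXY(XYtxt):
--     Fxytxt=sorted(XYtxt, key=lambda XYtxt: XYtxt[1])
--     #print (Fxytxt)
--     #840, 1610,2680
--     l1,l2,l3,l4=[],[],[],[]
--     #print (Fxytxt[0][0])
--     for i in Fxytxt:
--         if i[0]<=990:
--             l1.append(i)
--         elif 840 < i[0] <= 1910:
--             l2.append(i)
--         elif 1610 < i[0] <= 2780:
--             l3.append(i)
--         elif i[0] > 2680: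
--             l4.append(i)
--     #print (l1)
--     txtl1=[x[2] for x in l1]
--     txtl2=[x[2] for x in l2]
--     txtl3=[x[2] for x in l3]
--     txtl4=[x[2] for x in l4]
--     txt1="".join(txtl1)
--     txt2="".join(txtl2)
--     txt3="".join(txtl3)
--     txt4="".join(txtl4)
--     txtcontent = txt1+txt2+txt3+txt4
--     return txtcontent
-- ===== SOURCE B (Python) =====
-- def column(x0):
--     return 1 if x0 <= 990 else 2 if x0 <= 1910 else 3 if x0 <= 2780 else 4
--
-- def CompXY(XYtxt):
--     return "".join(t[2] for t in sorted(XYtxt, key=lambda t: (column(t[0]), t[1])))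
-- ===== Notes on version B (the rewrite author's own statement) =====
-- stated objective: simpler
-- what changed: Replaces the y-sort plus four-way bucketing loop and four joins with a single stable sort on the composite key (column(x0), y) followed by one join, after collapsing A's overlapping elif thresholds into a column() helper.
import Mathlib
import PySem

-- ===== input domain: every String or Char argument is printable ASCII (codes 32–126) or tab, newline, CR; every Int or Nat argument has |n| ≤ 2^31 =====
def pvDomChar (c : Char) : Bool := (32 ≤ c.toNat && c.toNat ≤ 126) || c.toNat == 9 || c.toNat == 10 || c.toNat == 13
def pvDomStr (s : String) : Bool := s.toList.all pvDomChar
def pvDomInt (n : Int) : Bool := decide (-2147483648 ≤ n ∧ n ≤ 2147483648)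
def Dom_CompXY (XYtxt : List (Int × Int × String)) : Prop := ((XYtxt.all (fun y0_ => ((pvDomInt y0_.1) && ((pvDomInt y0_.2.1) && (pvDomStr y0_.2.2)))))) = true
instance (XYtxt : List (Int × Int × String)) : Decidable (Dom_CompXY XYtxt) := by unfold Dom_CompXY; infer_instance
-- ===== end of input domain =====

-- B replaces A's y-sort + four-way bucketing loop + four joins by one stable sort on the
-- composite key (column, y) followed by a single join (simpler decomposition, same results).


-- ===== PORT A =====
def CompXY (XYtxt : List (Int × Int × String)) : String :=
  let Fxytxt := PySem.List.sorted XYtxt (fun t => t.2.1)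
  let ls : List (Int × Int × String) × List (Int × Int × String) × List (Int × Int × String) × List (Int × Int × String) :=
    Fxytxt.foldl (fun acc i =>
      if i.1 ≤ 990 then (acc.1 ++ [i], acc.2.1, acc.2.2.1, acc.2.2.2)
      else if 840 < i.1 ∧ i.1 ≤ 1910 then (acc.1, acc.2.1 ++ [i], acc.2.2.1, acc.2.2.2)
      else if 1610 < i.1 ∧ i.1 ≤ 2780 then (acc.1, acc.2.1, acc.2.2.1 ++ [i], acc.2.2.2)
      else if 2680 < i.1 then (acc.1, acc.2.1, acc.2.2.1, acc.2.2.2 ++ [i])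
      else acc) ([], [], [], [])
  let txtl1 := ls.1.map (fun x => x.2.2)
  let txtl2 := ls.2.1.map (fun x => x.2.2)
  let txtl3 := ls.2.2.1.map (fun x => x.2.2)
  let txtl4 := ls.2.2.2.map (fun x => x.2.2)
  let txt1 := PySem.Str.join "" txtl1
  let txt2 := PySem.Str.join "" txtl2
  let txt3 := PySem.Str.join "" txtl3
  let txt4 := PySem.Str.join "" txtl4
  txt1 ++ txt2 ++ txt3 ++ txt4

-- ===== PORT B =====
def column (x0 : Int) : Int :=
  if x0 ≤ 990 then 1 else if x0 ≤ 1910 then 2 else if x0 ≤ 2780 then 3 else 4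

def CompXY_alt (XYtxt : List (Int × Int × String)) : String :=
  PySem.Str.join ""
    ((PySem.List.sorted2 XYtxt (fun t => column t.1) (fun t => t.2.1)).map (fun t => t.2.2))

-- ===== PRECONDITION & SPEC =====
def Spec_CompXY (XYtxt : List (Int × Int × String)) (out : String) : Prop := out = CompXY_alt XYtxt
instance (XYtxt : List (Int × Int × String)) (out : String) : Decidable (Spec_CompXY XYtxt out) := by unfold Spec_CompXY; infer_instance

-- ===== CLAIM (what is proved, stated in full; the proofs are below) =====
def Claim_equal_CompXY : Prop := ∀ (XYtxt : List (Int × Int × String)), Dom_CompXY XYtxt → Spec_CompXY XYtxt (CompXY XYtxt)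

-- ===== LEMMAS AND PROOFS =====

-- abbreviations used only by the proofs
def pvY (t : Int × Int × String) : Int := t.2.1
def pvLtY (a b : Int × Int × String) : Bool := decide (pvY a < pvY b)
def pvLt2 (a b : Int × Int × String) : Bool :=
  decide (column a.1 < column b.1) || (!decide (column b.1 < column a.1) && decide (pvY a < pvY b))
def pvFil (k : Int) (l : List (Int × Int × String)) : List (Int × Int × String) :=
  l.filter (fun t => column t.1 == k)
def pvB (l : List (Int × Int × String)) : List (Int × Int × String) :=
  pvFil 1 l ++ pvFil 2 l ++ pvFil 3 l ++ pvFil 4 l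

theorem column_cases (x : Int) : column x = 1 ∨ column x = 2 ∨ column x = 3 ∨ column x = 4 := by
  unfold column; split_ifs <;> simp

-- one-step unfoldings of PySem.List.insertBy (definitional)
theorem insertBy_cons {α : Type} (b : α → α → Bool) (x e : α) (es : List α) :
    PySem.List.insertBy b x (e :: es) =
      if b x e then x :: e :: es else e :: PySem.List.insertBy b x es := rfl

theorem insertBy_nil {α : Type} (b : α → α → Bool) (x : α) :
    PySem.List.insertBy b x [] = [x] := rfl

-- insertBy puts x in front when `before` fires on every element
theorem insertBy_all_before {α : Type} (b : α → α → Bool) (x : α) (l : List α)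
    (h : ∀ e ∈ l, b x e = true) :
    PySem.List.insertBy b x l = x :: l := by
  cases l with
  | nil => rfl
  | cons e es => rw [insertBy_cons, if_pos (h e (by simp))]

-- insertBy only looks at `before x ·` on the elements of the list
theorem insertBy_congr {α : Type} (b1 b2 : α → α → Bool) (x : α) (l : List α)
    (h : ∀ e ∈ l, b1 x e = b2 x e) :
    PySem.List.insertBy b1 x l = PySem.List.insertBy b2 x l := by
  induction l with
  | nil => rfl
  | cons e es ih =>
    rw [insertBy_cons, insertBy_cons, h e (by simp),
        ih (fun e' he' => h e' (by simp [he']))]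

-- insertBy skips a prefix on which `before` never fires
theorem insertBy_append_not {α : Type} (before : α → α → Bool) (x : α) (f r : List α)
    (h : ∀ e ∈ f, before x e = false) :
    PySem.List.insertBy before x (f ++ r) = f ++ PySem.List.insertBy before x r := by
  induction f with
  | nil => rfl
  | cons e es ih =>
    rw [List.cons_append, insertBy_cons, h e (by simp), List.cons_append,
        ih (fun e' he' => h e' (by simp [he']))]
    simp

-- within the bucket the two predicates agree, and on everything after it `before` fires:
-- insert lands at the end of the bucket region
theorem insertBy_bucket {α : Type} (b1 b2 : α → α → Bool) (x : α) (f r : List α)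
    (hf : ∀ e ∈ f, b1 x e = b2 x e) (hr : ∀ e ∈ r, b1 x e = true) :
    PySem.List.insertBy b1 x (f ++ r) = PySem.List.insertBy b2 x f ++ r := by
  induction f with
  | nil => rw [List.nil_append, insertBy_all_before b1 x r hr, insertBy_nil]; rfl
  | cons e es ih =>
    rw [List.cons_append, insertBy_cons, insertBy_cons, hf e (by simp)]
    cases hb : b2 x e with
    | true => simp
    | false => simp [ih (fun e' he' => hf e' (by simp [he']))]

-- filtering commutes with y-insertion into a y-sorted list
theorem filter_insertY (p : (Int × Int × String) → Bool) (x : Int × Int × String)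
    (l : List (Int × Int × String)) (hs : l.Pairwise (fun a b => pvY a ≤ pvY b)) :
    (PySem.List.insertBy pvLtY x l).filter p =
      if p x then PySem.List.insertBy pvLtY x (l.filter p) else l.filter p := by
  induction l with
  | nil => cases hpx : p x <;> simp [PySem.List.insertBy, hpx]
  | cons e es ih =>
    have hs' : es.Pairwise (fun a b => pvY a ≤ pvY b) := hs.tail
    have hall : ∀ f ∈ es, pvY e ≤ pvY f := fun f hf => (List.pairwise_cons.mp hs).1 f hf
    by_cases hlt : pvY x < pvY e
    · -- x goes in front of everything
      have h1 : PySem.List.insertBy pvLtY x (e :: es) = x :: e :: es := by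
        simp [PySem.List.insertBy, pvLtY, hlt]
      have h2 : ∀ m, m ∈ (e :: es).filter p → pvLtY x m = true := by
        intro m hm
        have hm' := List.mem_of_mem_filter hm
        rcases List.mem_cons.mp hm' with h | h
        · simp [pvLtY, h, hlt]
        · have := hall m h; simp [pvLtY]; omega
      rw [h1]
      cases hpx : p x with
      | true =>
        rw [List.filter_cons, if_pos hpx, insertBy_all_before _ _ _ h2, if_pos rfl]
      | false => simp [List.filter_cons, hpx]
    · -- x goes after e
      have h1 : PySem.List.insertBy pvLtY x (e :: es) = e :: PySem.List.insertBy pvLtY x es := by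
        simp [PySem.List.insertBy, pvLtY, hlt]
      rw [h1]
      cases hpe : p e with
      | true =>
        have h2 : PySem.List.insertBy pvLtY x (e :: es.filter p) =
            e :: PySem.List.insertBy pvLtY x (es.filter p) := by
          simp [PySem.List.insertBy, pvLtY, hlt]
        cases hpx : p x <;>
          simp [hpe, hpx, ih hs', h2]
      | false =>
        cases hpx : p x <;> simp [hpe, hpx, ih hs']

-- the key step: lex-insertion into the bucket concatenation = bucket concatenation of y-insertion
theorem insert_step (x : Int × Int × String) (l : List (Int × Int × String))
    (hs : l.Pairwise (fun a b => pvY a ≤ pvY b)) :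
    PySem.List.insertBy pvLt2 x (pvB l) = pvB (PySem.List.insertBy pvLtY x l) := by
  have hfil : ∀ (k : Int) (e : Int × Int × String), e ∈ pvFil k l → column e.1 = k := by
    intro k e he
    unfold pvFil at he
    have h2 := (List.mem_filter.mp he).2
    exact beq_iff_eq.mp h2
  have hlow : ∀ (k : Int), column x.1 = k → ∀ j, j < k → ∀ e ∈ pvFil j l, pvLt2 x e = false := by
    intro k hk j hj e he
    have hc := hfil j e he
    simp [pvLt2, hk, hc]; omega
  have hsame : ∀ (k : Int), column x.1 = k → ∀ e ∈ pvFil k l, pvLt2 x e = pvLtY x e := by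
    intro k hk e he
    have hc := hfil k e he
    simp [pvLt2, pvLtY, hk, hc]
  have hhigh : ∀ (k : Int), column x.1 = k → ∀ j, k < j → ∀ e ∈ pvFil j l, pvLt2 x e = true := by
    intro k hk j hj e he
    have hc := hfil j e he
    simp [pvLt2, hk, hc]; omega
  have hB : ∀ k, pvFil k (PySem.List.insertBy pvLtY x l) =
      if column x.1 = k then PySem.List.insertBy pvLtY x (pvFil k l) else pvFil k l := by
    intro k
    have := filter_insertY (fun t => column t.1 == k) x l hs
    simp only [pvFil, this]
    by_cases h : column x.1 = k <;> simp [h]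
  rcases column_cases x.1 with hk | hk | hk | hk
  · rw [show pvB l = pvFil 1 l ++ (pvFil 2 l ++ pvFil 3 l ++ pvFil 4 l) by simp [pvB]]
    rw [insertBy_bucket pvLt2 pvLtY x _ _ (hsame 1 hk)
        (by intro e he; simp only [List.mem_append] at he
            rcases he with (he | he) | he
            exacts [hhigh 1 hk 2 (by norm_num) e he, hhigh 1 hk 3 (by norm_num) e he,
                    hhigh 1 hk 4 (by norm_num) e he])]
    simp [pvB, hB, hk]
  · rw [show pvB l = pvFil 1 l ++ (pvFil 2 l ++ (pvFil 3 l ++ pvFil 4 l)) by simp [pvB]]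
    rw [insertBy_append_not pvLt2 x _ _ (hlow 2 hk 1 (by norm_num))]
    rw [insertBy_bucket pvLt2 pvLtY x _ _ (hsame 2 hk)
        (by intro e he; simp only [List.mem_append] at he
            rcases he with he | he
            exacts [hhigh 2 hk 3 (by norm_num) e he, hhigh 2 hk 4 (by norm_num) e he])]
    simp [pvB, hB, hk]
  · rw [show pvB l = (pvFil 1 l ++ pvFil 2 l) ++ (pvFil 3 l ++ pvFil 4 l) by simp [pvB]]
    rw [insertBy_append_not pvLt2 x _ _
        (by intro e he; simp only [List.mem_append] at he
            rcases he with he | he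
            exacts [hlow 3 hk 1 (by norm_num) e he, hlow 3 hk 2 (by norm_num) e he])]
    rw [insertBy_bucket pvLt2 pvLtY x _ _ (hsame 3 hk) (hhigh 3 hk 4 (by norm_num))]
    simp [pvB, hB, hk]
  · rw [show pvB l = (pvFil 1 l ++ pvFil 2 l ++ pvFil 3 l) ++ pvFil 4 l by simp [pvB]]
    rw [insertBy_append_not pvLt2 x _ _
        (by intro e he; simp only [List.mem_append] at he
            rcases he with (he | he) | he
            exacts [hlow 4 hk 1 (by norm_num) e he, hlow 4 hk 2 (by norm_num) e he,
                    hlow 4 hk 3 (by norm_num) e he])]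
    rw [insertBy_congr pvLt2 pvLtY x (pvFil 4 l) (hsame 4 hk)]
    simp [pvB, hB, hk]

-- the composite-key sort is the bucket concatenation of the y-sort
theorem sorted2_eq_buckets (xs : List (Int × Int × String)) :
    PySem.List.sorted2 xs (fun t => column t.1) (fun t => t.2.1) =
      pvB (PySem.List.sorted xs (fun t => t.2.1)) := by
  have key : ∀ (ws : List (Int × Int × String)),
      ws.foldl (fun acc x => PySem.List.insertBy pvLt2 x acc) [] =
        pvB (ws.foldl (fun acc x => PySem.List.insertBy pvLtY x acc) []) := by
    intro ws
    induction ws using List.reverseRecOn with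
    | nil => rfl
    | append_singleton ws x ih =>
      rw [List.foldl_append, List.foldl_append]
      simp only [List.foldl_cons, List.foldl_nil, ih]
      have hsorted : (ws.foldl (fun acc x => PySem.List.insertBy pvLtY x acc) []).Pairwise
          (fun a b => pvY a ≤ pvY b) := by
        have := PySem.List.sorted_pairwise (xs := ws) (key := fun t => t.2.1)
        rw [PySem.List.sorted_eq_foldl_insertBy] at this
        exact this
      exact insert_step x _ hsorted
  have h1 : PySem.List.sorted2 xs (fun t => column t.1) (fun t => t.2.1) =
      xs.foldl (fun acc x => PySem.List.insertBy pvLt2 x acc) [] := by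
    simp only [PySem.List.sorted2]
    rfl
  have h2 : PySem.List.sorted xs (fun t => t.2.1) =
      xs.foldl (fun acc x => PySem.List.insertBy pvLtY x acc) [] :=
    PySem.List.sorted_eq_foldl_insertBy xs _
  rw [h1, h2, key]

-- A's bucketing loop computes the four column filters of its input
theorem foldA_eq (s : List (Int × Int × String))
    (a1 a2 a3 a4 : List (Int × Int × String)) :
    s.foldl (fun acc i =>
      if i.1 ≤ 990 then (acc.1 ++ [i], acc.2.1, acc.2.2.1, acc.2.2.2)
      else if 840 < i.1 ∧ i.1 ≤ 1910 then (acc.1, acc.2.1 ++ [i], acc.2.2.1, acc.2.2.2)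
      else if 1610 < i.1 ∧ i.1 ≤ 2780 then (acc.1, acc.2.1, acc.2.2.1 ++ [i], acc.2.2.2)
      else if 2680 < i.1 then (acc.1, acc.2.1, acc.2.2.1, acc.2.2.2 ++ [i])
      else acc) (a1, a2, a3, a4) =
    (a1 ++ pvFil 1 s, a2 ++ pvFil 2 s, a3 ++ pvFil 3 s, a4 ++ pvFil 4 s) := by
  induction s generalizing a1 a2 a3 a4 with
  | nil => simp [pvFil]
  | cons i t ih =>
    have hcol : ∀ (k : Int) (r : List (Int × Int × String)),
        pvFil k (i :: r) = (if column i.1 = k then [i] else []) ++ pvFil k r := by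
      intro k r
      by_cases h : column i.1 = k <;> simp [pvFil, h]
    simp only [List.foldl_cons]
    rcases column_cases i.1 with hk | hk | hk | hk <;>
      [ (have hi : i.1 ≤ 990 := by unfold column at hk; split_ifs at hk <;> omega);
        (have hi : ¬ i.1 ≤ 990 ∧ (840 < i.1 ∧ i.1 ≤ 1910) := by
          unfold column at hk; split_ifs at hk <;> omega);
        (have hi : ¬ i.1 ≤ 990 ∧ ¬ (840 < i.1 ∧ i.1 ≤ 1910) ∧ (1610 < i.1 ∧ i.1 ≤ 2780) := by
          unfold column at hk; split_ifs at hk <;> omega);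
        (have hi : ¬ i.1 ≤ 990 ∧ ¬ (840 < i.1 ∧ i.1 ≤ 1910) ∧ ¬ (1610 < i.1 ∧ i.1 ≤ 2780) ∧ 2680 < i.1 := by
          unfold column at hk; split_ifs at hk <;> omega) ] <;>
    · first
      | (rw [if_pos hi]; rw [ih]; simp [hcol, hk])
      | (rw [if_neg hi.1, if_pos hi.2]; rw [ih]; simp [hcol, hk])
      | (rw [if_neg hi.1, if_neg hi.2.1, if_pos hi.2.2]; rw [ih]; simp [hcol, hk])
      | (rw [if_neg hi.1, if_neg hi.2.1, if_neg hi.2.2.1, if_pos hi.2.2.2]; rw [ih]; simp [hcol, hk])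

-- "".join is concatenation of the parts
theorem join_empty_flatten (parts : List (List Char)) :
    PySem.Chars.join [] parts = parts.flatten := by
  induction parts with
  | nil => simp [PySem.Chars.join_nil]
  | cons p rest ih =>
    cases rest with
    | nil => simp [PySem.Chars.join_singleton]
    | cons q r => rw [PySem.Chars.join_cons_cons]; simp_all

theorem toList_join_empty (parts : List String) :
    (PySem.Str.join "" parts).toList = (parts.map String.toList).flatten := by
  rw [PySem.Str.toList_join, show ("" : String).toList = [] from rfl, join_empty_flatten]

-- ===== VERDICT (by name: the statement is the Claim_ definition above) =====
theorem CompXY_spec : Claim_equal_CompXY := by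
  intro XYtxt _
  unfold Spec_CompXY CompXY CompXY_alt
  apply String.toList_inj.mp
  rw [sorted2_eq_buckets]
  simp only [foldA_eq, List.nil_append]
  simp only [String.toList_append, toList_join_empty, pvB, List.map_append, List.flatten_append]
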